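-- pv_equiv track=rewrite | github.com/Brok3n68/CodeWars | Python/[4 kyu] Sum by Factors.py | sum_for_list
-- ===== SOURCE A (Python) =====
-- import math
-- from collections import defaultdict
--
-- def is_prime(n):
--     if n <= 1:
--         return False
--     if n == 2 or n == 3:
--         return True
--     if n % 2 == 0 or n % 3 == 0:
--         return False
--     i = 5
--     while i * i <= n:
--         if n % i == 0 or n % (i + 2) == 0:
--             return False
--         i += 6
--     return True
--
-- def prime_factors(n):
--     n = abs(n)
--     factors = set()
--     while n % 2 == 0:
--         factors.add(2)
--         n //= 2
--     for i in range(3, int(math.sqrt(n)) + 1, 2):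
--         while n % i == 0:
--             if is_prime(i):
--                 factors.add(i)
--             n //= i
--     if n > 2 and is_prime(n):
--         factors.add(n)
--     return factors
--
-- def sum_for_list(lst):
--     if not lst:
--         return []
--     prime_sum = defaultdict(int)
--     for num in lst:
--         factors = prime_factors(num)
--         for prime in factors:
--             prime_sum[prime] += num
--     result = sorted([[prime, prime_sum[prime]] for prime in prime_sum])
--
--     return result
-- ===== SOURCE B (Python) =====
-- def distinct_primes(n):
--     # Distinct prime factors of |n| by plain trial division from 2 upward:
--     # every divisor found is automatically prime, so no primality test is needed.
--     n = abs(n)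
--     ps = []
--     d = 2
--     while d * d <= n:
--         if n % d == 0:
--             ps.append(d)
--             while n % d == 0:
--                 n //= d
--         d += 1
--     if n > 1:
--         ps.append(n)
--     return ps
--
-- def sum_for_list(lst):
--     # Phase 1: one factoring pass collecting the set of occurring primes.
--     # Phase 2: for each prime (in sorted order), re-scan the list summing
--     # the elements it divides.
--     if not lst:
--         return []
--     primes = set()
--     for num in lst:
--         primes.update(distinct_primes(num))
--     return [[p, sum(num for num in lst if num % p == 0)] for p in sorted(primes)]
-- ===== Notes on version B (the rewrite author's own statement) =====
-- stated objective: alternative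
-- what changed: B replaces A's accumulate-while-factoring defaultdict pass (with its 6k+/-1 primality-tested, sqrt-bounded odd-step factorizer) by two shaped passes: a plain trial-division factoring pass that only collects the set of occurring primes, then one divisibility re-scan of the list per sorted prime (summing num with num % p == 0), with no accumulator dict and no primality test.
import Mathlib
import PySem

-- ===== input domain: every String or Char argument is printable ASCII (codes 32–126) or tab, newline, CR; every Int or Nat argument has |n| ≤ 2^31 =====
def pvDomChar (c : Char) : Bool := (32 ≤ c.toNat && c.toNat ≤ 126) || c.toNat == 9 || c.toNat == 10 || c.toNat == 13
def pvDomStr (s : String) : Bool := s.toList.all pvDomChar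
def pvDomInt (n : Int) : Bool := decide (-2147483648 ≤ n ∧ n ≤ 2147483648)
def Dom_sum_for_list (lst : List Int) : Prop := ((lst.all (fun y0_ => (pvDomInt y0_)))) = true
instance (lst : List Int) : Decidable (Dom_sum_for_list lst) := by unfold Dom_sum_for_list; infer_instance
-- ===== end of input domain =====

-- B replaces A's accumulate-while-factoring dict pass (6k±1-primality-tested odd-step factorizer)
-- by two shaped passes: a plain trial-division pass collecting the set of occurring primes, then
-- one divisibility re-scan of the list per sorted prime; objective: alternative (not faster).

-- ===== PORT A =====
-- while i*i <= n: … i += 6   (fuel 8000 covers every call reachable from |n| ≤ 2^31, where the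
-- loop runs at most ⌈√(2^31)/6⌉ < 7725 times; the fuel only makes the recursion total)
def isPrimeLoop : Nat → Int → Int → Bool
  | 0, _, _ => true
  | fuel+1, n, i =>
    if i * i ≤ n then
      if PySem.Int.mod n i == 0 || PySem.Int.mod n (i + 2) == 0 then false
      else isPrimeLoop fuel n (i + 6)
    else true

def isPrime (n : Int) : Bool :=
  if n ≤ 1 then false
  else if n == 2 || n == 3 then true
  else if PySem.Int.mod n 2 == 0 || PySem.Int.mod n 3 == 0 then false
  else isPrimeLoop 8000 n 5

-- while n % 2 == 0: factors.add(2); n //= 2   (fuel 64 > log2(2^31); exact for n ≠ 0, and on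
-- n = 0 — where the Python loops forever, excluded by Pre_ — the fuel merely makes it total)
def pfTwoLoop : Nat → PySem.Set Int → Int → PySem.Set Int × Int
  | 0, s, n => (s, n)
  | fuel+1, s, n =>
    if PySem.Int.mod n 2 == 0 then pfTwoLoop fuel (PySem.Set.add s 2) (PySem.Int.floordiv n 2)
    else (s, n)

-- while n % i == 0: if is_prime(i): factors.add(i); n //= i   (fuel 64 > log3(2^31), same remark)
def pfOddLoop (i : Int) : Nat → PySem.Set Int × Int → PySem.Set Int × Int
  | 0, st => st
  | fuel+1, (s, n) =>
    if PySem.Int.mod n i == 0 then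
      pfOddLoop i fuel ((if isPrime i then PySem.Set.add s i else s), PySem.Int.floordiv n i)
    else (s, n)

def primeFactors (n0 : Int) : PySem.Set Int :=
  -- int(math.sqrt(n)) = Nat.sqrt exactly for 0 ≤ n ≤ 2^31 (float sqrt is exact enough there)
  let st := pfTwoLoop 64 PySem.Set.empty |n0|
  let st := (PySem.List.pyRange 3 ((st.2.toNat.sqrt : Int) + 1) 2).foldl
      (fun st i => pfOddLoop i 64 st) st
  if st.2 > 2 && isPrime st.2 then PySem.Set.add st.1 st.2 else st.1

def sum_for_list (lst : List Int) : List (List Int) :=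
  if lst = [] then []
  else
    let d := lst.foldl
      (fun d num => (primeFactors num).foldl
        (fun d2 p => d2.insert p (d2.getD p 0 + num)) d)
      PySem.Dict.empty
    PySem.List.sorted (d.keys.map (fun p => [p, d.getD p 0])) (fun x => x) false

-- ===== PORT B =====
-- inner 'while n % d == 0: n //= d' of distinct_primes (fuel 64 > log2(2^31): exact for n ≥ 1)
def divOutLoop : Nat → Int → Int → Int
  | 0, _, n => n
  | fuel+1, d, n =>
    if PySem.Int.mod n d == 0 then divOutLoop fuel d (PySem.Int.floordiv n d)
    else n

-- outer 'while d * d <= n: … d += 1' of distinct_primes, plus the trailing 'if n > 1' append;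
-- d increments every iteration and d stays ≤ √(2^31)+1 < 46342, so fuel 50000 is never exhausted
-- on the admitted domain (it only makes the recursion total)
def factLoop : Nat → Int → Int → List Int
  | 0, _, n => if 1 < n then [n] else []
  | fuel+1, d, n =>
    if d * d ≤ n then
      if PySem.Int.mod n d == 0 then d :: factLoop fuel (d + 1) (divOutLoop 64 d n)
      else factLoop fuel (d + 1) n
    else if 1 < n then [n] else []

def distinctPrimes (n : Int) : List Int := factLoop 50000 2 |n|

def sum_for_list_alt (lst : List Int) : List (List Int) :=
  if lst = [] then []
  else
    let primes := lst.foldl (fun s num => PySem.Set.update s (distinctPrimes num)) PySem.Set.empty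
    (PySem.List.sorted primes (fun p => p) false).map
      (fun p => [p, lst.foldl (fun a num => if PySem.Int.mod num p == 0 then a + num else a) 0])

-- ===== PRECONDITION & SPEC =====
-- Pre_ excludes lists containing 0: prime_factors(0) loops forever (while 0 % 2 == 0), so the
-- Python A never returns on such inputs.
def Pre_sum_for_list (lst : List Int) : Prop := (0 : Int) ∉ lst
instance (lst : List Int) : Decidable (Pre_sum_for_list lst) := by unfold Pre_sum_for_list; infer_instance
def pvWitness_sum_for_list : List Int := [12, 15]

def Spec_sum_for_list (lst : List Int) (out : List (List Int)) : Prop := out = sum_for_list_alt lst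
instance (lst : List Int) (out : List (List Int)) : Decidable (Spec_sum_for_list lst out) := by unfold Spec_sum_for_list; infer_instance

-- ===== CLAIM (what is proved, stated in full; the proofs are below) =====
def Claim_equal_sum_for_list : Prop := ∀ (lst : List Int), Dom_sum_for_list lst → Pre_sum_for_list lst → Spec_sum_for_list lst (sum_for_list lst)

-- ===== LEMMAS AND PROOFS =====

-- ---------- elementary prime facts over Int ----------

theorem int_prime_two_le (p : Int) (hp : Prime p) (h0 : 0 < p) : 2 ≤ p := by
  by_cases h : 2 ≤ p
  · exact h
  · have hp1 : p = 1 := by omega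
    exact absurd (hp1 ▸ hp) not_prime_one

theorem dvd_prime_pos_eq (p n : Int) (hn : Prime n) (hp : Prime p) (h0p : 0 < p) (h0n : 0 < n)
    (hd : p ∣ n) : p = n := by
  obtain ⟨c, hc⟩ := hd
  rcases hn.irreducible.isUnit_or_isUnit hc with hu | hu
  · exact absurd hu hp.not_unit
  · rcases Int.isUnit_iff.mp hu with rfl | rfl
    · simpa using hc.symm
    · nlinarith [hc]

theorem not_prime_dvd_one (p : Int) (hp : Prime p) (hd : p ∣ 1) : False :=
  hp.not_unit (isUnit_of_dvd_one hd)

theorem exists_small_prime_factor (n : Int) (h2 : 2 ≤ n) (hnp : ¬ Prime n) :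
    ∃ q : Int, Prime q ∧ 0 < q ∧ q ∣ n ∧ q * q ≤ n := by
  have hm2 : 2 ≤ n.natAbs := by omega
  have hmp : ¬ n.natAbs.Prime := fun h => hnp (Int.prime_iff_natAbs_prime.mpr h)
  refine ⟨(n.natAbs.minFac : Int), ?_, ?_, ?_, ?_⟩
  · rw [Int.prime_iff_natAbs_prime]
    simpa using Nat.minFac_prime (by omega)
  · exact_mod_cast (Nat.minFac_prime (n := n.natAbs) (by omega)).pos
  · have := Nat.minFac_dvd n.natAbs
    have h : (n.natAbs.minFac : Int) ∣ (n.natAbs : Int) := Int.natCast_dvd_natCast.mpr this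
    rwa [Int.natAbs_of_nonneg (by omega)] at h
  · have h := Nat.minFac_sq_le_self (n := n.natAbs) (by omega) hmp
    have : (n.natAbs.minFac : Int) * n.natAbs.minFac ≤ (n.natAbs : Int) := by
      have := h
      rw [pow_two] at this
      exact_mod_cast this
    rwa [Int.natAbs_of_nonneg (by omega)] at this

-- a composite n ≥ 2 with no prime factor below its square root cannot exist
theorem prime_of_no_small_factor (n d : Int) (h2 : 2 ≤ n) (hd0 : 0 ≤ d) (hlt : n < d * d)
    (hno : ∀ q, Prime q → 0 < q → q < d → ¬ q ∣ n) : Prime n := by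
  by_contra hnp
  obtain ⟨q, hq, hq0, hqd, hqq⟩ := exists_small_prime_factor n h2 hnp
  have hqlt : q < d := by
    by_contra hcon
    have hle : d ≤ q := by omega
    have : d * d ≤ q * q := mul_self_le_mul_self hd0 hle
    linarith
  exact hno q hq hq0 hqlt hqd

-- dividing out a prime d preserves divisibility by any other positive prime
theorem dvd_div_iff_of_prime (q d n m : Int) (hd : Prime d) (hq : Prime q) (h0q : 0 < q)
    (h0d : 0 < d) (hqd : q ≠ d) (hm : n = d * m) : (q ∣ m ↔ q ∣ n) := by
  constructor
  · intro h; exact hm ▸ Dvd.dvd.mul_left h d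
  · intro h
    rcases hq.dvd_mul.mp (hm ▸ h) with h' | h'
    · exact absurd (dvd_prime_pos_eq q d hd hq h0q h0d h') hqd
    · exact h'

-- ---------- the 6k±1 primality test is complete on positive primes ----------

theorem isPrimeLoop_of_prime (fuel : Nat) : ∀ (n i : Int), Prime n → 0 < n → 5 ≤ i →
    isPrimeLoop fuel n i = true := by
  induction fuel with
  | zero => intro n i _ _ _; rfl
  | succ f ih =>
    intro n i hn h0 hi
    simp only [isPrimeLoop]
    split
    · rename_i hii
      -- a divisor of the prime n lying in [5, √n] (resp. [7, √n + 2]) is impossible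
      have hnd : ¬ i ∣ n := by
        intro hd
        obtain ⟨c, hc⟩ := hd
        rcases hn.irreducible.isUnit_or_isUnit hc with hu | hu
        · rcases Int.isUnit_iff.mp hu with h | h <;> omega
        · rcases Int.isUnit_iff.mp hu with h | h <;> rw [h] at hc <;> nlinarith [hc]
      have hnd2 : ¬ (i + 2) ∣ n := by
        intro hd
        obtain ⟨c, hc⟩ := hd
        rcases hn.irreducible.isUnit_or_isUnit hc with hu | hu
        · rcases Int.isUnit_iff.mp hu with h | h <;> omega
        · rcases Int.isUnit_iff.mp hu with h | h <;> rw [h] at hc <;> nlinarith [hc]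
      have h1 : ¬ (PySem.Int.mod n i == 0 || PySem.Int.mod n (i + 2) == 0) = true := by
        simp only [Bool.or_eq_true, beq_iff_eq, PySem.Int.mod_eq_zero_iff_dvd]
        push_neg
        exact ⟨hnd, hnd2⟩
      rw [if_neg h1]
      exact ih n (i + 6) hn h0 (by omega)
    · rfl

theorem isPrime_of_prime (n : Int) (hn : Prime n) (h0 : 0 < n) : isPrime n = true := by
  have h2 := int_prime_two_le n hn h0
  unfold isPrime
  rw [if_neg (by omega)]
  by_cases h23 : n = 2 ∨ n = 3
  · rcases h23 with rfl | rfl <;> simp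
  · push_neg at h23
    have h5 : 5 ≤ n := by
      rcases h23 with ⟨hn2, hn3⟩
      by_contra h
      interval_cases n
      · exact hn2 rfl
      · exact hn3 rfl
      · have := Int.prime_iff_natAbs_prime.mp hn
        norm_num at this
    have hc1 : (n == 2 || n == 3) = false := by
      simp only [Bool.or_eq_false_iff, beq_eq_false_iff_ne]; omega
    have hnd2 : ¬ (2:Int) ∣ n := by
      intro hd
      have := dvd_prime_pos_eq 2 n hn Int.prime_two (by omega) h0 hd
      omega
    have hnd3 : ¬ (3:Int) ∣ n := by
      intro hd
      have := dvd_prime_pos_eq 3 n hn Int.prime_three (by omega) h0 hd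
      omega
    have hc2 : (PySem.Int.mod n 2 == 0 || PySem.Int.mod n 3 == 0) = false := by
      simp only [Bool.or_eq_false_iff, beq_eq_false_iff_ne, ne_eq,
        PySem.Int.mod_eq_zero_iff_dvd]
      exact ⟨hnd2, hnd3⟩
    rw [hc1, if_neg (by simp), hc2, if_neg (by simp)]
    exact isPrimeLoop_of_prime 8000 n 5 hn h0 (by omega)

-- ---------- characterization of A's pfTwoLoop ----------

theorem pfTwoLoop_spec (fuel : Nat) : ∀ (s : PySem.Set Int) (n : Int), 0 < n → n < 2 ^ fuel →
    0 < (pfTwoLoop fuel s n).2 ∧ ¬ (2:Int) ∣ (pfTwoLoop fuel s n).2 ∧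
    (∀ q : Int, Prime q → 0 < q → q ≠ 2 → (q ∣ (pfTwoLoop fuel s n).2 ↔ q ∣ n)) ∧
    (pfTwoLoop fuel s n).2 ∣ n ∧
    (∀ p, p ∈ (pfTwoLoop fuel s n).1 ↔ p ∈ s ∨ (p = 2 ∧ (2:Int) ∣ n)) := by
  induction fuel with
  | zero =>
    intro s n h0 hlt
    norm_num at hlt
    exact absurd h0 (by omega)
  | succ f ih =>
    intro s n h0 hlt
    by_cases h2 : (2:Int) ∣ n
    · have hcond : (PySem.Int.mod n 2 == 0) = true := by
        rw [beq_iff_eq, PySem.Int.mod_eq_zero_iff_dvd]; exact h2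
      have hstep : pfTwoLoop (f+1) s n
          = pfTwoLoop f (PySem.Set.add s 2) (PySem.Int.floordiv n 2) := by
        simp only [pfTwoLoop, hcond, if_true]
      rw [hstep, PySem.Int.floordiv_eq_ediv_of_pos (by norm_num : (0:Int) < 2)]
      have hm : n = 2 * (n / 2) := (Int.mul_ediv_cancel' h2).symm
      have hpow : (2:Int) ^ (f+1) = 2 * 2 ^ f := by ring
      have h0' : 0 < n / 2 := by omega
      have hlt' : n / 2 < 2 ^ f := by omega
      obtain ⟨ha, hb, hc, hd, he⟩ := ih (PySem.Set.add s 2) (n / 2) h0' hlt'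
      refine ⟨ha, hb, ?_, ?_, ?_⟩
      · intro q hq hq0 hq2
        rw [hc q hq hq0 hq2]
        exact dvd_div_iff_of_prime q 2 n (n / 2) Int.prime_two hq hq0 (by norm_num) hq2 hm
      · exact hd.trans ⟨2, by linarith [mul_comm (n / 2) (2:Int)]⟩
      · intro p
        rw [he p, PySem.Set.mem_add]
        constructor
        · rintro ((h | h) | ⟨rfl, _⟩)
          · exact Or.inl h
          · exact Or.inr ⟨h, h2⟩
          · exact Or.inr ⟨rfl, h2⟩
        · rintro (h | ⟨rfl, _⟩)
          · exact Or.inl (Or.inl h)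
          · exact Or.inl (Or.inr rfl)
    · have hcond : ¬ ((PySem.Int.mod n 2 == 0) = true) := by
        rw [beq_iff_eq, PySem.Int.mod_eq_zero_iff_dvd]; exact h2
      have hstep : pfTwoLoop (f+1) s n = (s, n) := by
        simp only [pfTwoLoop, if_neg hcond]
      rw [hstep]
      exact ⟨h0, h2, fun q _ _ _ => Iff.rfl, dvd_refl n, fun p => by simp [h2]⟩

-- ---------- characterization of A's pfOddLoop (for a positive prime i) ----------

theorem pfOddLoop_spec (i : Int) (hi : Prime i) (h0i : 0 < i) (fuel : Nat) :
    ∀ (s : PySem.Set Int) (n : Int), 0 < n → n < 2 ^ fuel →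
    0 < (pfOddLoop i fuel (s, n)).2 ∧ ¬ i ∣ (pfOddLoop i fuel (s, n)).2 ∧
    (∀ q : Int, Prime q → 0 < q → q ≠ i → (q ∣ (pfOddLoop i fuel (s, n)).2 ↔ q ∣ n)) ∧
    (pfOddLoop i fuel (s, n)).2 ∣ n ∧
    (∀ p, p ∈ (pfOddLoop i fuel (s, n)).1 ↔ p ∈ s ∨ (p = i ∧ i ∣ n)) := by
  have hi2 : 2 ≤ i := int_prime_two_le i hi h0i
  induction fuel with
  | zero =>
    intro s n h0 hlt
    norm_num at hlt
    exact absurd h0 (by omega)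
  | succ f ih =>
    intro s n h0 hlt
    by_cases hdvd : i ∣ n
    · have hcond : (PySem.Int.mod n i == 0) = true := by
        rw [beq_iff_eq, PySem.Int.mod_eq_zero_iff_dvd]; exact hdvd
      have hip : isPrime i = true := isPrime_of_prime i hi h0i
      have hstep : pfOddLoop i (f+1) (s, n)
          = pfOddLoop i f (PySem.Set.add s i, PySem.Int.floordiv n i) := by
        simp only [pfOddLoop, hcond, if_true, hip]
      rw [hstep, PySem.Int.floordiv_eq_ediv_of_pos h0i]
      have hm : n = i * (n / i) := (Int.mul_ediv_cancel' hdvd).symm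
      have h0' : 0 < n / i := by
        by_cases h : 0 < n / i
        · exact h
        · have hle : n / i ≤ 0 := by omega
          have := mul_nonpos_of_nonneg_of_nonpos (le_of_lt h0i) hle
          linarith
      have h2m : 2 * (n / i) ≤ n := by
        have := mul_le_mul_of_nonneg_right hi2 (le_of_lt h0')
        linarith
      have hpow : (2:Int) ^ (f+1) = 2 * 2 ^ f := by ring
      have hlt' : n / i < 2 ^ f := by omega
      obtain ⟨ha, hb, hc, hd, he⟩ := ih (PySem.Set.add s i) (n / i) h0' hlt'
      refine ⟨ha, hb, ?_, ?_, ?_⟩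
      · intro q hq hq0 hqi
        rw [hc q hq hq0 hqi]
        exact dvd_div_iff_of_prime q i n (n / i) hi hq hq0 h0i hqi hm
      · exact hd.trans ⟨i, by linarith [mul_comm (n / i) i]⟩
      · intro p
        rw [he p, PySem.Set.mem_add]
        constructor
        · rintro ((h | h) | ⟨rfl, _⟩)
          · exact Or.inl h
          · exact Or.inr ⟨h, hdvd⟩
          · exact Or.inr ⟨rfl, hdvd⟩
        · rintro (h | ⟨rfl, _⟩)
          · exact Or.inl (Or.inl h)
          · exact Or.inl (Or.inr rfl)
    · have hcond : ¬ ((PySem.Int.mod n i == 0) = true) := by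
        rw [beq_iff_eq, PySem.Int.mod_eq_zero_iff_dvd]; exact hdvd
      have hstep : pfOddLoop i (f+1) (s, n) = (s, n) := by
        simp only [pfOddLoop, if_neg hcond]
      rw [hstep]
      exact ⟨h0, hdvd, fun q _ _ _ => Iff.rfl, dvd_refl n, fun p => by simp [hdvd]⟩

theorem pfOddLoop_stay (i : Int) (fuel : Nat) (s : PySem.Set Int) (n : Int)
    (h : ¬ i ∣ n) : pfOddLoop i (fuel + 1) (s, n) = (s, n) := by
  simp only [pfOddLoop]
  rw [if_neg (by simpa [PySem.Int.mod_eq_zero_iff_dvd] using h)]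

-- ---------- step-2 ranges: nil/cons induction forms ----------

theorem pyRange2_nil (t B : Int) (h : B ≤ t) : PySem.List.pyRange t B 2 = [] := by
  rw [PySem.List.pyRange_of_pos t B (by norm_num)]
  rw [if_neg (by omega)]
  simp

theorem pyRange2_cons (t B : Int) (h : t < B) :
    PySem.List.pyRange t B 2 = t :: PySem.List.pyRange (t+2) B 2 := by
  rw [PySem.List.pyRange_of_pos t B (by norm_num),
    PySem.List.pyRange_of_pos (t+2) B (by norm_num)]
  rw [if_pos h]
  by_cases h2 : t + 2 < B
  · rw [if_pos h2]
    have hc : ((B - t + 2 - 1) / 2).toNat = ((B - (t+2) + 2 - 1) / 2).toNat + 1 := by omega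
    rw [hc, List.range_succ_eq_map, List.map_cons, List.map_map]
    refine congrArg₂ _ (by norm_num) ?_
    apply List.map_congr_left
    intro k _
    simp only [Function.comp_apply]
    push_cast
    ring
  · rw [if_neg h2]
    have hc : ((B - t + 2 - 1) / 2).toNat = 1 := by omega
    rw [hc]
    norm_num

-- ---------- the odd-range fold of primeFactors ----------

-- invariant: n is positive, divides the odd start value N, has no prime factor below the
-- threshold t, agrees with N on prime factors ≥ t; the set holds the baseline plus exactly
-- the primes dividing N already divided out of n
def OddInv (N : Int) (s0 : PySem.Set Int) (s : PySem.Set Int) (n t : Int) : Prop :=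
  0 < n ∧ n ∣ N ∧ (∀ q : Int, Prime q → 0 < q → q < t → ¬ q ∣ n) ∧
  (∀ q : Int, Prime q → 0 < q → t ≤ q → (q ∣ n ↔ q ∣ N)) ∧
  (∀ p, p ∈ s ↔ p ∈ s0 ∨ (Prime p ∧ 0 < p ∧ p ∣ N ∧ ¬ p ∣ n))

theorem oddFold_spec (N : Int) (hN0 : 0 < N) (hN : N ≤ 2 ^ 31) (s0 : PySem.Set Int) (B : Int) :
    ∀ (k : Nat) (t : Int), (B - t).toNat ≤ k → 3 ≤ t → t % 2 = 1 →
    ∀ (s : PySem.Set Int) (n : Int), OddInv N s0 s n t →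
    ∃ T : Int, B ≤ T ∧
      OddInv N s0 ((PySem.List.pyRange t B 2).foldl (fun st i => pfOddLoop i 64 st) (s, n)).1
        ((PySem.List.pyRange t B 2).foldl (fun st i => pfOddLoop i 64 st) (s, n)).2 T := by
  intro k
  induction k with
  | zero =>
    intro t hk h3 hodd s n hinv
    have hBt : B ≤ t := by omega
    rw [pyRange2_nil t B hBt]
    exact ⟨t, hBt, hinv⟩
  | succ k ih =>
    intro t hk h3 hodd s n hinv
    by_cases hlt : t < B
    · rw [pyRange2_cons t B hlt]
      simp only [List.foldl_cons]
      obtain ⟨h0n, hndvd, hnofac, htrans, hmem⟩ := hinv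
      have hnN : n ≤ N := Int.le_of_dvd hN0 hndvd
      have hn64 : n < 2 ^ 64 := by
        have : (2:Int) ^ 31 < 2 ^ 64 := by norm_num
        omega
      by_cases hdvd : t ∣ n
      · -- t divides n: t must be prime (no smaller prime divides n)
        have htp : Prime t := by
          by_contra hnp
          obtain ⟨q, hq, hq0, hqd, hqq⟩ := exists_small_prime_factor t (by omega) hnp
          have hqle : q ≤ t := Int.le_of_dvd (by omega) hqd
          have hqt : q < t := by
            rcases eq_or_lt_of_le hqle with rfl | h
            · nlinarith [int_prime_two_le q hq hq0]
            · exact h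
          exact hnofac q hq hq0 hqt (hqd.trans hdvd)
        obtain ⟨ha, hb, hc, hd, he⟩ := pfOddLoop_spec t htp (by omega) 64 s n h0n hn64
        have hinv' : OddInv N s0 (pfOddLoop t 64 (s, n)).1 (pfOddLoop t 64 (s, n)).2 (t + 2) := by
          refine ⟨ha, hd.trans hndvd, ?_, ?_, ?_⟩
          · intro q hq hq0 hqlt hqdvd
            rcases lt_trichotomy q t with h | rfl | h
            · exact hnofac q hq hq0 h ((hc q hq hq0 (by omega)).mp hqdvd)
            · exact hb hqdvd
            · -- q = t + 1 is even, so q = 2 < t, impossible as well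
              have hq1 : q = t + 1 := by omega
              have h2q : (2:Int) ∣ q := by omega
              have h2 : (2:Int) = q := dvd_prime_pos_eq 2 q hq Int.prime_two (by omega) hq0 h2q
              omega
          · intro q hq hq0 hqge
            rw [hc q hq hq0 (by omega), htrans q hq hq0 (by omega)]
          · intro p
            rw [he p, hmem p]
            constructor
            · rintro ((hp | ⟨hpp, hp0, hpN, hpn⟩) | ⟨hpt, _⟩)
              · exact Or.inl hp
              · exact Or.inr ⟨hpp, hp0, hpN, fun hcon => hpn (hcon.trans hd)⟩
              · subst hpt
                exact Or.inr ⟨htp, by omega, (htrans _ htp (by omega) (by omega)).mp hdvd, hb⟩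
            · rintro (hp | ⟨hpp, hp0, hpN, hpn'⟩)
              · exact Or.inl (Or.inl hp)
              · by_cases hpt : p = t
                · exact Or.inr ⟨hpt, hpt ▸ hdvd⟩
                · refine Or.inl (Or.inr ⟨hpp, hp0, hpN, fun hcon => ?_⟩)
                  exact hpn' ((hc p hpp hp0 hpt).mpr hcon)
        obtain ⟨T, hT, hinvT⟩ := ih (t + 2) (by omega) (by omega) (by omega)
          (pfOddLoop t 64 (s, n)).1 (pfOddLoop t 64 (s, n)).2 hinv'
        rw [Prod.mk.eta] at hinvT
        exact ⟨T, hT, hinvT⟩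
      · rw [show pfOddLoop t 64 (s, n) = (s, n) from pfOddLoop_stay t 63 s n hdvd]
        have hinv' : OddInv N s0 s n (t + 2) := by
          refine ⟨h0n, hndvd, ?_, ?_, hmem⟩
          · intro q hq hq0 hqlt hqdvd
            rcases lt_trichotomy q t with h | rfl | h
            · exact hnofac q hq hq0 h hqdvd
            · exact hdvd hqdvd
            · have hq1 : q = t + 1 := by omega
              have h2q : (2:Int) ∣ q := by omega
              have h2 : (2:Int) = q := dvd_prime_pos_eq 2 q hq Int.prime_two (by omega) hq0 h2q
              exact hnofac q hq hq0 (by omega) hqdvd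
          · intro q hq hq0 hqge
            exact htrans q hq hq0 (by omega)
        exact ih (t + 2) (by omega) (by omega) (by omega) s n hinv'
    · rw [pyRange2_nil t B (by omega)]
      exact ⟨t, by omega, hinv⟩

-- ---------- membership characterization of A's primeFactors ----------

theorem mem_primeFactors (n : Int) (hn : n ≠ 0) (hb : |n| ≤ 2 ^ 31) :
    ∀ p, p ∈ primeFactors n ↔ Prime p ∧ 0 < p ∧ p ∣ n := by
  intro p
  have h0A : 0 < |n| := abs_pos.mpr hn
  have hA64 : |n| < 2 ^ 64 := by
    have : (2:Int) ^ 31 < 2 ^ 64 := by norm_num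
    omega
  obtain ⟨h1pos, h1odd, h1trans, h1dvd, h1mem⟩ :=
    pfTwoLoop_spec 64 PySem.Set.empty |n| h0A hA64
  simp only [primeFactors]
  set E := pfTwoLoop 64 PySem.Set.empty |n| with hE
  have hNle : E.2 ≤ 2 ^ 31 := le_trans (Int.le_of_dvd h0A h1dvd) hb
  set K : Int := (E.2.toNat.sqrt : Int) with hK
  have hK0 : 0 ≤ K := Int.natCast_nonneg _
  have hinit : OddInv E.2 E.1 E.1 E.2 3 := by
    refine ⟨h1pos, dvd_refl _, ?_, fun q _ _ _ => Iff.rfl, ?_⟩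
    · intro q hq hq0 hqlt
      have h2q := int_prime_two_le q hq hq0
      have hq2 : q = 2 := by omega
      subst hq2
      exact h1odd
    · intro x
      constructor
      · exact fun h => Or.inl h
      · rintro (h | ⟨_, _, hxE, hcon⟩)
        · exact h
        · exact absurd hxE hcon
  obtain ⟨T, hTB, hF⟩ := oddFold_spec E.2 h1pos hNle E.1 (K + 1) ((K + 1) - 3).toNat 3
    (by omega) (by norm_num) (by norm_num) E.1 E.2 hinit
  rw [Prod.mk.eta] at hF
  set F := (PySem.List.pyRange 3 (K + 1) 2).foldl (fun st i => pfOddLoop i 64 st) E with hFdef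
  obtain ⟨hf0, hfdvd, hfnofac, hftrans, hfmem⟩ := hF
  have hfleN : F.2 ≤ E.2 := Int.le_of_dvd h1pos hfdvd
  have hEK : E.2 < (K + 1) * (K + 1) := by
    have h1 := Nat.lt_succ_sqrt E.2.toNat
    have h2 : E.2 = (E.2.toNat : Int) := (Int.toNat_of_nonneg (le_of_lt h1pos)).symm
    have h3 : (E.2.toNat : Int) < ((E.2.toNat.sqrt.succ : Nat) : Int) * ((E.2.toNat.sqrt.succ : Nat) : Int) := by
      exact_mod_cast h1
    rw [h2, hK]
    push_cast at h3 ⊢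
    linarith
  have hf_prime_or : F.2 = 1 ∨ Prime F.2 := by
    by_cases h1f : 1 < F.2
    · refine Or.inr (prime_of_no_small_factor F.2 (K + 1) (by omega) (by omega) (by linarith) ?_)
      intro q hq hq0 hqlt
      exact hfnofac q hq hq0 (by omega)
    · left; omega
  have hf2 : ¬ (2:Int) ∣ F.2 := fun hcon => h1odd (hcon.trans hfdvd)
  have hmemF1 : ∀ x, x ∈ F.1 → Prime x ∧ 0 < x ∧ x ∣ |n| := by
    intro x hx
    rcases (hfmem x).mp hx with hx1 | ⟨hpp, hp0, hpE, _⟩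
    · rcases (h1mem x).mp hx1 with hempty | ⟨rfl, h2A⟩
      · exact absurd hempty (by simp [PySem.Set.empty])
      · exact ⟨Int.prime_two, by norm_num, h2A⟩
    · exact ⟨hpp, hp0, hpE.trans h1dvd⟩
  rw [← dvd_abs p n]
  constructor
  · intro hp
    split_ifs at hp with hcnd
    · rcases (PySem.Set.mem_add F.1 F.2 p).mp hp with h | h
      · exact hmemF1 p h
      · rw [Bool.and_eq_true] at hcnd
        have hgt : 2 < F.2 := of_decide_eq_true hcnd.1
        have hfp : Prime F.2 := by
          rcases hf_prime_or with h1 | h2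
          · exact absurd h1 (by omega)
          · exact h2
        exact h ▸ ⟨hfp, by omega, hfdvd.trans h1dvd⟩
    · exact hmemF1 p hp
  · rintro ⟨hpp, hp0, hpA⟩
    by_cases hp2 : p = 2
    · have hmem2 : p ∈ F.1 := (hfmem p).mpr (Or.inl ((h1mem p).mpr (Or.inr ⟨hp2, hp2 ▸ hpA⟩)))
      split_ifs with hcnd
      · exact (PySem.Set.mem_add F.1 F.2 p).mpr (Or.inl hmem2)
      · exact hmem2
    · have hpE : p ∣ E.2 := (h1trans p hpp hp0 hp2).mpr hpA
      by_cases hpf : p ∣ F.2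
      · have hf1 : F.2 ≠ 1 := fun h1 => not_prime_dvd_one p hpp (h1 ▸ hpf)
        have hfp : Prime F.2 := by
          rcases hf_prime_or with h | h
          · exact absurd h hf1
          · exact h
        have hpeq : p = F.2 := dvd_prime_pos_eq p F.2 hfp hpp hp0 hf0 hpf
        have hgt : 2 < F.2 := by
          have h2f := int_prime_two_le F.2 hfp hf0
          by_contra hcon
          have hf2eq : F.2 = 2 := by omega
          exact hf2 (hf2eq ▸ dvd_refl F.2)
        have hcnd : (decide (F.2 > 2) && isPrime F.2) = true := by
          rw [Bool.and_eq_true]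
          exact ⟨decide_eq_true hgt, isPrime_of_prime F.2 hfp hf0⟩
        rw [if_pos hcnd]
        exact (PySem.Set.mem_add F.1 F.2 p).mpr (Or.inr hpeq)
      · have hmemp : p ∈ F.1 := (hfmem p).mpr (Or.inr ⟨hpp, hp0, hpE, hpf⟩)
        split_ifs with hcnd
        · exact (PySem.Set.mem_add F.1 F.2 p).mpr (Or.inl hmemp)
        · exact hmemp

-- ---------- characterization of B's loops ----------

theorem divOutLoop_spec (d : Int) (hd : Prime d) (h0d : 0 < d) (fuel : Nat) :
    ∀ n : Int, 0 < n → n < 2 ^ fuel →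
    0 < divOutLoop fuel d n ∧ ¬ d ∣ divOutLoop fuel d n ∧
    (∀ q : Int, Prime q → 0 < q → q ≠ d → (q ∣ divOutLoop fuel d n ↔ q ∣ n)) ∧
    divOutLoop fuel d n ∣ n := by
  have hd2 : 2 ≤ d := int_prime_two_le d hd h0d
  induction fuel with
  | zero =>
    intro n h0 hlt
    norm_num at hlt
    exact absurd h0 (by omega)
  | succ f ih =>
    intro n h0 hlt
    by_cases hdvd : d ∣ n
    · have hcond : (PySem.Int.mod n d == 0) = true := by
        rw [beq_iff_eq, PySem.Int.mod_eq_zero_iff_dvd]; exact hdvd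
      have hstep : divOutLoop (f+1) d n = divOutLoop f d (PySem.Int.floordiv n d) := by
        simp only [divOutLoop, hcond, if_true]
      rw [hstep, PySem.Int.floordiv_eq_ediv_of_pos h0d]
      have hm : n = d * (n / d) := (Int.mul_ediv_cancel' hdvd).symm
      have h0' : 0 < n / d := by
        by_cases h : 0 < n / d
        · exact h
        · have hle : n / d ≤ 0 := by omega
          have := mul_nonpos_of_nonneg_of_nonpos (le_of_lt h0d) hle
          linarith
      have h2m : 2 * (n / d) ≤ n := by
        have := mul_le_mul_of_nonneg_right hd2 (le_of_lt h0')
        linarith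
      have hpow : (2:Int) ^ (f+1) = 2 * 2 ^ f := by ring
      have hlt' : n / d < 2 ^ f := by omega
      obtain ⟨ha, hb, hc, hd'⟩ := ih (n / d) h0' hlt'
      refine ⟨ha, hb, ?_, ?_⟩
      · intro q hq hq0 hqd
        rw [hc q hq hq0 hqd]
        exact dvd_div_iff_of_prime q d n (n / d) hd hq hq0 h0d hqd hm
      · exact hd'.trans ⟨d, by linarith [mul_comm (n / d) d]⟩
    · have hcond : ¬ ((PySem.Int.mod n d == 0) = true) := by
        rw [beq_iff_eq, PySem.Int.mod_eq_zero_iff_dvd]; exact hdvd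
      have hstep : divOutLoop (f+1) d n = n := by
        simp only [divOutLoop, if_neg hcond]
      rw [hstep]
      exact ⟨h0, hdvd, fun q _ _ _ => Iff.rfl, dvd_refl n⟩

-- the loop-exit value: [n] if n > 1 (then n is prime: no factor ≤ its square root), else []
theorem factTail_spec (d n : Int) (h2d : 2 ≤ d) (h0 : 0 < n) (hlt : n < d * d)
    (hinv : ∀ q : Int, Prime q → 0 < q → q < d → ¬ q ∣ n) :
    ∀ p, p ∈ (if 1 < n then [n] else ([] : List Int)) ↔ Prime p ∧ 0 < p ∧ p ∣ n := by
  intro p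
  by_cases h1 : 1 < n
  · have hn : Prime n := prime_of_no_small_factor n d (by omega) (by omega) hlt hinv
    rw [if_pos h1]
    simp only [List.mem_singleton]
    constructor
    · rintro rfl
      exact ⟨hn, h0, dvd_refl p⟩
    · rintro ⟨hp, h0p, hdp⟩
      exact dvd_prime_pos_eq p n hn hp h0p h0 hdp
  · rw [if_neg h1]
    simp only [List.not_mem_nil, false_iff]
    rintro ⟨hp, h0p, hdp⟩
    have hn1 : n = 1 := by omega
    exact not_prime_dvd_one p hp (hn1 ▸ hdp)

theorem factLoop_spec (fuel : Nat) : ∀ (d n : Int), 2 ≤ d → 0 < n → n ≤ 2 ^ 31 →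
    n < (d + fuel) * (d + fuel) → (∀ q : Int, Prime q → 0 < q → q < d → ¬ q ∣ n) →
    ∀ p, p ∈ factLoop fuel d n ↔ Prime p ∧ 0 < p ∧ p ∣ n := by
  induction fuel with
  | zero =>
    intro d n h2d h0 _ hlt hinv
    have hlt' : n < d * d := by push_cast at hlt; simpa using hlt
    exact factTail_spec d n h2d h0 hlt' hinv
  | succ f ih =>
    intro d n h2d h0 h31 hlt hinv
    have hcast : d + ((f+1 : Nat) : Int) = (d + 1) + (f : Int) := by push_cast; ring
    simp only [factLoop]
    by_cases hdd : d * d ≤ n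
    · rw [if_pos hdd]
      by_cases hdvd : d ∣ n
      · have hdp : Prime d := by
          by_contra hnp
          obtain ⟨q, hq, hq0, hqd, hqq⟩ := exists_small_prime_factor d h2d hnp
          have hqle : q ≤ d := Int.le_of_dvd (by omega) hqd
          have hqlt : q < d := by
            rcases eq_or_lt_of_le hqle with rfl | h
            · nlinarith [int_prime_two_le q hq hq0]
            · exact h
          exact hinv q hq hq0 hqlt (hqd.trans hdvd)
        have hcond : (PySem.Int.mod n d == 0) = true := by
          rw [beq_iff_eq, PySem.Int.mod_eq_zero_iff_dvd]; exact hdvd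
        rw [if_pos hcond]
        have hn64 : n < 2 ^ 64 := by
          have : (2:Int) ^ 31 < 2 ^ 64 := by norm_num
          omega
        obtain ⟨hoa, hob, hoc, hod⟩ := divOutLoop_spec d hdp (by omega) 64 n h0 hn64
        have hole : divOutLoop 64 d n ≤ n := Int.le_of_dvd h0 hod
        have hrec := ih (d + 1) (divOutLoop 64 d n) (by omega) hoa (by linarith)
          (by rw [← hcast]; linarith)
          (by
            intro q hq hq0 hqlt
            rcases lt_or_eq_of_le (by omega : q ≤ d) with h | rfl
            · intro hcon
              exact hinv q hq hq0 h ((hoc q hq hq0 (by omega)).mp hcon)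
            · exact hob)
        intro p
        rw [List.mem_cons, hrec p]
        constructor
        · rintro (rfl | ⟨hp, h0p, hdp'⟩)
          · exact ⟨hdp, by omega, hdvd⟩
          · exact ⟨hp, h0p, hdp'.trans hod⟩
        · rintro ⟨hp, h0p, hdp'⟩
          by_cases hpd : p = d
          · exact Or.inl hpd
          · exact Or.inr ⟨hp, h0p, (hoc p hp h0p hpd).mpr hdp'⟩
      · have hcond : ¬ ((PySem.Int.mod n d == 0) = true) := by
          rw [beq_iff_eq, PySem.Int.mod_eq_zero_iff_dvd]; exact hdvd
        rw [if_neg hcond]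
        exact ih (d + 1) n (by omega) h0 h31 (by rw [← hcast]; linarith)
          (by
            intro q hq hq0 hqlt
            rcases lt_or_eq_of_le (by omega : q ≤ d) with h | rfl
            · exact hinv q hq hq0 h
            · exact hdvd)
    · rw [if_neg hdd]
      exact factTail_spec d n h2d h0 (by omega) hinv

theorem mem_distinctPrimes (n : Int) (hn : n ≠ 0) (hb : |n| ≤ 2 ^ 31) :
    ∀ p, p ∈ distinctPrimes n ↔ Prime p ∧ 0 < p ∧ p ∣ n := by
  intro p
  have h0A : 0 < |n| := abs_pos.mpr hn
  have hbig : ((2:Int) + (50000 : Nat)) * ((2:Int) + (50000 : Nat)) = 2500200004 := by norm_num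
  have h31 : (2:Int) ^ 31 = 2147483648 := by norm_num
  unfold distinctPrimes
  rw [factLoop_spec 50000 2 |n| (by norm_num) h0A hb (by linarith)
    (fun q hq hq0 hqlt => absurd (int_prime_two_le q hq hq0) (by omega)) p, dvd_abs]

-- ---------- nodup of primeFactors (needed for the sort of A's pairs) ----------

theorem pfTwoLoop_nodup (fuel : Nat) : ∀ (s : PySem.Set Int) (n : Int), s.Nodup → (pfTwoLoop fuel s n).1.Nodup := by
  induction fuel with
  | zero => intro s n h; exact h
  | succ f ih =>
    intro s n h
    simp only [pfTwoLoop]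
    split
    · exact ih _ _ (PySem.Set.nodup_add s 2 h)
    · exact h

theorem pfOddLoop_nodup (i : Int) (fuel : Nat) : ∀ (st : PySem.Set Int × Int), st.1.Nodup → (pfOddLoop i fuel st).1.Nodup := by
  induction fuel with
  | zero => intro st h; exact h
  | succ f ih =>
    intro st h
    obtain ⟨s, n⟩ := st
    simp only [pfOddLoop]
    split
    · refine ih _ ?_
      split
      · exact PySem.Set.nodup_add s i h
      · exact h
    · exact h

theorem foldl_pfOddLoop_nodup (l : List Int) : ∀ (st : PySem.Set Int × Int), st.1.Nodup →
    (l.foldl (fun st i => pfOddLoop i 64 st) st).1.Nodup := by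
  induction l with
  | nil => intro st h; exact h
  | cons x t ih => intro st h; exact ih _ (pfOddLoop_nodup x 64 st h)

theorem nodup_primeFactors (n0 : Int) : (primeFactors n0).Nodup := by
  have haux : ∀ st : PySem.Set Int × Int, st.1.Nodup →
      (if (decide (st.2 > 2) && isPrime st.2) = true then PySem.Set.add st.1 st.2 else st.1).Nodup := by
    intro st h
    split
    · exact PySem.Set.nodup_add _ _ h
    · exact h
  exact haux _ (foldl_pfOddLoop_nodup _ _ (pfTwoLoop_nodup 64 PySem.Set.empty |n0| List.nodup_nil))

-- ---------- A's dict pass: keys and values ----------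

theorem keysA (L : List Int) : ∀ (d : PySem.Dict Int Int),
    (L.foldl (fun d num => (primeFactors num).foldl
        (fun d2 p => d2.insert p (d2.getD p 0 + num)) d) d).keys
    = L.foldl (fun s num => PySem.Set.update s (primeFactors num)) d.keys := by
  induction L with
  | nil => intro d; rfl
  | cons x t ih =>
    intro d
    simp only [List.foldl_cons]
    rw [ih, PySem.Dict.keys_foldl_insert]

theorem innerVal (fs : List Int) (num : Int) (p : Int) : ∀ (d : PySem.Dict Int Int), fs.Nodup →
    ((fs.foldl (fun d2 q => d2.insert q (d2.getD q 0 + num)) d).getD p 0)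
    = if p ∈ fs then d.getD p 0 + num else d.getD p 0 := by
  induction fs with
  | nil => intro d _; simp
  | cons q t ih =>
    intro d hnd
    simp only [List.foldl_cons, List.mem_cons]
    rw [ih _ hnd.of_cons]
    by_cases hpq : p = q
    · subst hpq
      have hpt : p ∉ t := (List.nodup_cons.mp hnd).1
      simp [hpt]
    · simp [hpq, PySem.Dict.getD_insert]

theorem valA (L : List Int) (p : Int) : ∀ (d : PySem.Dict Int Int),
    ((L.foldl (fun d num => (primeFactors num).foldl
        (fun d2 q => d2.insert q (d2.getD q 0 + num)) d) d).getD p 0)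
    = L.foldl (fun a num => if p ∈ primeFactors num then a + num else a) (d.getD p 0) := by
  induction L with
  | nil => intro d; rfl
  | cons x t ih =>
    intro d
    simp only [List.foldl_cons]
    rw [ih, innerVal _ _ _ _ (nodup_primeFactors x)]

-- membership in a fold of Set.update over per-element lists
theorem mem_foldl_update (F : Int → List Int) (L : List Int) :
    ∀ (s : PySem.Set Int) (p : Int),
    p ∈ L.foldl (fun s x => PySem.Set.update s (F x)) s ↔ p ∈ s ∨ ∃ x ∈ L, p ∈ F x := by
  induction L with
  | nil => intro s p; simp
  | cons y t ih =>
    intro s p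
    simp only [List.foldl_cons, ih, PySem.Set.mem_update, List.mem_cons]
    constructor
    · rintro ((h | h) | ⟨x, hx, hp⟩)
      · exact Or.inl h
      · exact Or.inr ⟨y, Or.inl rfl, h⟩
      · exact Or.inr ⟨x, Or.inr hx, hp⟩
    · rintro (h | ⟨x, (rfl | hx), hp⟩)
      · exact Or.inl (Or.inl h)
      · exact Or.inl (Or.inr hp)
      · exact Or.inr ⟨x, hx, hp⟩

theorem nodup_foldl_update (F : Int → List Int) (L : List Int) :
    ∀ (s : PySem.Set Int), s.Nodup →
    (L.foldl (fun s x => PySem.Set.update s (F x)) s).Nodup := by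
  induction L with
  | nil => intro s h; exact h
  | cons y t ih => intro s h; exact ih _ (PySem.Set.nodup_update _ _ h)

-- ---------- sorting [key, value] pairs = map over sorted keys ----------

theorem pair_lt_iff (p q vp vq : Int) (h : p ≠ q) :
    (([p, vp] : List Int) < [q, vq]) ↔ p < q := by
  constructor
  · intro hl
    cases hl with
    | cons htl => exact absurd rfl h
    | rel hr => exact hr
  · exact fun hlt => List.Lex.rel hlt

theorem insertBy_map_pair (v : Int → Int) (x : Int) : ∀ (ys : List Int), x ∉ ys →
    PySem.List.insertBy (fun a b => decide (a < b)) [x, v x] (ys.map (fun p => [p, v p]))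
    = (PySem.List.insertBy (fun a b => decide (a < b)) x ys).map (fun p => [p, v p]) := by
  intro ys
  induction ys with
  | nil => intro _; rfl
  | cons y t ih =>
    intro hx
    have hxy : x ≠ y := fun he => hx (he ▸ List.mem_cons_self)
    have hxt : x ∉ t := fun hm => hx (List.mem_cons_of_mem _ hm)
    simp only [List.map_cons, PySem.List.insertBy]
    by_cases hlt : x < y
    · have h1 : decide (([x, v x] : List Int) < [y, v y]) = true :=
        decide_eq_true (List.Lex.rel hlt)
      simp [h1, decide_eq_true hlt]
    · have h1 : decide (([x, v x] : List Int) < [y, v y]) = false :=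
        decide_eq_false (fun hc => hlt ((pair_lt_iff x y (v x) (v y) hxy).mp hc))
      simp [h1, decide_eq_false hlt, ih hxt]

theorem foldl_insertBy_map (v : Int → Int) : ∀ (K acc : List Int), K.Nodup → (∀ x ∈ K, x ∉ acc) →
    K.foldl (fun a x => PySem.List.insertBy (fun a b => decide (a < b)) [x, v x] a) (acc.map (fun p => [p, v p]))
    = (K.foldl (fun a x => PySem.List.insertBy (fun a b => decide (a < b)) x a) acc).map (fun p => [p, v p]) := by
  intro K
  induction K with
  | nil => intro acc _ _; rfl
  | cons x t ih =>
    intro acc hnd hdis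
    simp only [List.foldl_cons]
    rw [insertBy_map_pair v x acc (hdis x List.mem_cons_self)]
    apply ih _ hnd.of_cons
    intro z hz hmem
    rw [PySem.List.mem_insertBy] at hmem
    rcases hmem with rfl | hmem
    · exact (List.nodup_cons.mp hnd).1 hz
    · exact hdis z (List.mem_cons_of_mem _ hz) hmem

theorem sortMap (K : List Int) (hnd : K.Nodup) (v : Int → Int) :
    PySem.List.sorted (K.map (fun p => [p, v p])) (fun x => x) false
    = (PySem.List.sorted K (fun p => p) false).map (fun p => [p, v p]) := by
  rw [PySem.List.sorted_eq_foldl_insertBy, PySem.List.sorted_eq_foldl_insertBy, List.foldl_map]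
  exact foldl_insertBy_map v K [] hnd (by simp)

-- ===== VERDICT (by name: the statement is the Claim_ definition above) =====
theorem sum_for_list_spec : Claim_equal_sum_for_list := by
  intro lst hdom hpre
  unfold Spec_sum_for_list sum_for_list sum_for_list_alt
  by_cases hnil : lst = []
  · simp [hnil]
  · rw [if_neg hnil, if_neg hnil]
    simp only [Dom_sum_for_list] at hdom
    have h31 : (2:Int) ^ 31 = 2147483648 := by norm_num
    have hbd : ∀ num ∈ lst, num ≠ 0 ∧ |num| ≤ 2 ^ 31 := by
      intro num hm
      have h := List.all_eq_true.mp hdom num hm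
      simp only [pvDomInt, decide_eq_true_eq] at h
      refine ⟨fun h0 => hpre (h0 ▸ hm), ?_⟩
      rw [abs_le]
      omega
    set dA := lst.foldl (fun d num => (primeFactors num).foldl
        (fun d2 p => d2.insert p (d2.getD p 0 + num)) d) PySem.Dict.empty with hdA
    have hkeys : dA.keys = lst.foldl (fun s num => PySem.Set.update s (primeFactors num)) [] := by
      rw [hdA, keysA, PySem.Dict.keys_empty]
    have hndA : dA.keys.Nodup := by
      rw [hkeys]
      exact nodup_foldl_update _ _ _ List.nodup_nil
    set UB := lst.foldl (fun s num => PySem.Set.update s (distinctPrimes num)) PySem.Set.empty with hUB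
    have hndB : UB.Nodup := nodup_foldl_update _ _ _ (by simp [PySem.Set.empty])
    have hmemA : ∀ p, p ∈ dA.keys ↔ ∃ x ∈ lst, Prime p ∧ 0 < p ∧ p ∣ x := by
      intro p
      rw [hkeys, mem_foldl_update primeFactors lst [] p]
      constructor
      · rintro (h | ⟨x, hx, hmem⟩)
        · exact absurd h (by simp)
        · exact ⟨x, hx, (mem_primeFactors x (hbd x hx).1 (hbd x hx).2 p).mp hmem⟩
      · rintro ⟨x, hx, hp⟩
        exact Or.inr ⟨x, hx, (mem_primeFactors x (hbd x hx).1 (hbd x hx).2 p).mpr hp⟩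
    have hmemB : ∀ p, p ∈ UB ↔ ∃ x ∈ lst, Prime p ∧ 0 < p ∧ p ∣ x := by
      intro p
      rw [hUB, mem_foldl_update distinctPrimes lst PySem.Set.empty p]
      constructor
      · rintro (h | ⟨x, hx, hmem⟩)
        · exact absurd h (by simp [PySem.Set.empty])
        · exact ⟨x, hx, (mem_distinctPrimes x (hbd x hx).1 (hbd x hx).2 p).mp hmem⟩
      · rintro ⟨x, hx, hp⟩
        exact Or.inr ⟨x, hx, (mem_distinctPrimes x (hbd x hx).1 (hbd x hx).2 p).mpr hp⟩
    have hperm : dA.keys.Perm UB :=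
      (List.perm_ext_iff_of_nodup hndA hndB).mpr (fun p => by rw [hmemA p, hmemB p])
    have hsorted : PySem.List.sorted dA.keys (fun p => p) false
        = PySem.List.sorted UB (fun p => p) false := by
      exact (PySem.List.sorted_id_eq_sorted_id_iff_perm dA.keys UB).mpr hperm
    rw [sortMap dA.keys hndA (fun p => dA.getD p 0)]
    show List.map (fun p => [p, dA.getD p 0]) (PySem.List.sorted dA.keys (fun p => p) false)
      = List.map (fun p => [p, List.foldl (fun a num => if PySem.Int.mod num p == 0 then a + num else a) 0 lst])
        (PySem.List.sorted UB (fun p => p) false)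
    rw [← hsorted]
    apply List.map_congr_left
    intro p hp
    have hpk : p ∈ dA.keys := (PySem.List.mem_sorted dA.keys (fun p => p) false p).mp hp
    obtain ⟨x0, hx0, hpp, hp0, _⟩ := (hmemA p).mp hpk
    have hval : dA.getD p 0
        = lst.foldl (fun a num => if PySem.Int.mod num p == 0 then a + num else a) 0 := by
      rw [hdA, valA lst p PySem.Dict.empty, PySem.Dict.getD_empty]
      apply PySem.List.foldl_congr_mem
      intro acc x hx
      by_cases hdx : p ∣ x
      · rw [if_pos ((mem_primeFactors x (hbd x hx).1 (hbd x hx).2 p).mpr ⟨hpp, hp0, hdx⟩),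
          if_pos (by rw [beq_iff_eq, PySem.Int.mod_eq_zero_iff_dvd]; exact hdx)]
      · rw [if_neg (fun hc => hdx ((mem_primeFactors x (hbd x hx).1 (hbd x hx).2 p).mp hc).2.2),
          if_neg (by rw [beq_iff_eq, PySem.Int.mod_eq_zero_iff_dvd]; exact hdx)]
    rw [hval]
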